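-- pv_equiv track=rewrite | github.com/tmmoond8/python_algorithm | 100june/02902.py | solution
-- ===== SOURCE A (Python) =====
-- def solution(str):
--   C = []
--   c = None
--   for i in range(0, len(str)):
--     if(c == None and str[i] != '-'):
--       c = str[i]
--       C.append(c)
--     elif (str[i] == '-'):
--       c = None
--   return ''.join(C)
-- ===== SOURCE B (Python) =====
-- def solution(str):
--   return ''.join(part[0] for part in str.split('-') if part)
-- ===== Notes on version B (the rewrite author's own statement) =====
-- stated objective: simpler
-- what changed: Replaces A's per-character flag state machine with str.split on the dash followed by taking the first character of each non-empty group.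
import Mathlib
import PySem

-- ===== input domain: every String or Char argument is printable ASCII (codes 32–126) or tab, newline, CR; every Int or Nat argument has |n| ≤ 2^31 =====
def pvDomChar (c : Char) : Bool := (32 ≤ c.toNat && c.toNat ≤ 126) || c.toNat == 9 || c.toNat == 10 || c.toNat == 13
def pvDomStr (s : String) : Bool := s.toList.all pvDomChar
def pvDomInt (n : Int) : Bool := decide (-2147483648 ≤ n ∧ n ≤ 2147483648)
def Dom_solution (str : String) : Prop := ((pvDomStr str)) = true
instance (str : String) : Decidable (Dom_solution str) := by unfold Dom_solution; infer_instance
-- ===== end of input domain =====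

-- B replaces A's flag-driven per-character scan with split('-') then first-char-of-each-nonempty-group (simpler decomposition, same cost).

-- ===== PORT A =====
-- scan each character, with c the current group marker (none = between groups), C the collected chars
def pvStep (st : Option Char × List Char) (ch : Char) : Option Char × List Char :=
  match st with
  | (none, C) => if ch ≠ '-' then (some ch, C ++ [ch]) else (none, C)
  | (some c, C) => if ch = '-' then (none, C) else (some c, C)

def solution (str : String) : String :=
  String.mk (str.toList.foldl pvStep (none, [])).2

-- ===== PORT B =====
-- str.split('-') → PySem.Chars.splitOn; ''.join(part[0] for part in parts if part) → filterMap head?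
def solution_alt (str : String) : String :=
  String.mk ((PySem.Chars.splitOn str.toList ['-']).filterMap List.head?)

-- ===== PRECONDITION & SPEC =====
def Spec_solution (str : String) (out : String) : Prop := out = solution_alt str
instance (str : String) (out : String) : Decidable (Spec_solution str out) := by unfold Spec_solution; infer_instance

-- ===== CLAIM (what is proved, stated in full; the proofs are below) =====
def Claim_equal_solution : Prop := ∀ (str : String), Dom_solution str → Spec_solution str (solution str)

-- ===== LEMMAS AND PROOFS =====

-- the heads of the maximal dash-free groups; the flag says whether we are inside a group
def pvHeads : List Char → Bool → List Char
  | [], _ => []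
  | c :: rest, false => if c = '-' then pvHeads rest false else c :: pvHeads rest true
  | c :: rest, true => pvHeads rest (c ≠ '-')

-- reference recursion for splitting on '-' (cur = reversed current piece)
def pvSplitAux : List Char → List Char → List (List Char)
  | [], cur => [cur.reverse]
  | c :: rest, cur => if c = '-' then cur.reverse :: pvSplitAux rest [] else pvSplitAux rest (c :: cur)

lemma pv_go_spec : ∀ (fuel : Nat) (l cur : List Char) (acc : List (List Char)),
    l.length ≤ fuel →
    PySem.Chars.splitOn.go ['-'] fuel l cur acc = acc.reverse ++ pvSplitAux l cur := by
  intro fuel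
  induction fuel with
  | zero =>
    intro l cur acc h
    have : l = [] := List.length_eq_zero_iff.mp (Nat.le_zero.mp h)
    subst this
    simp [PySem.Chars.splitOn.go, pvSplitAux]
  | succ n ih =>
    intro l cur acc h
    cases l with
    | nil => simp [PySem.Chars.splitOn.go, pvSplitAux]
    | cons c rest =>
      have hr : rest.length ≤ n := by simpa using h
      by_cases hc : c = '-'
      · subst hc
        rw [PySem.Chars.splitOn.go]
        rw [show (List.isPrefixOf ['-'] ('-' :: rest)) = true from by simp [List.isPrefixOf]]
        rw [if_pos rfl]
        rw [show List.drop (List.length ['-']) ('-' :: rest) = rest from rfl]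
        rw [ih _ _ _ hr]
        simp [pvSplitAux]
      · rw [PySem.Chars.splitOn.go]
        rw [show (List.isPrefixOf ['-'] (c :: rest)) = false from by
          simp [List.isPrefixOf]; exact fun h' => hc h'.symm]
        rw [if_neg (by simp)]
        rw [ih _ _ _ hr]
        simp [pvSplitAux, hc]

lemma pv_splitAux_heads : ∀ (l cur : List Char),
    (pvSplitAux l cur).filterMap List.head? =
      cur.getLast?.toList ++ pvHeads l (cur ≠ []) := by
  intro l
  induction l with
  | nil =>
    intro cur
    cases cur with
    | nil => simp [pvSplitAux, pvHeads]
    | cons a as => simp [pvSplitAux, pvHeads, List.head?_reverse, List.getLast?_cons]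
  | cons c rest ih =>
    intro cur
    by_cases hc : c = '-'
    · subst hc
      rw [pvSplitAux, if_pos rfl, List.filterMap_cons]
      rw [ih []]
      cases cur with
      | nil => simp [pvHeads]
      | cons a as => simp [pvHeads, List.head?_reverse, List.getLast?_cons]
    · rw [pvSplitAux, if_neg hc, ih (c :: cur)]
      cases cur with
      | nil => simp [pvHeads, hc]
      | cons a as => simp [pvHeads, hc, List.getLast?_cons_cons]

lemma pv_foldl_heads : ∀ (l : List Char) (o : Option Char) (acc : List Char),
    (l.foldl pvStep (o, acc)).2 = acc ++ pvHeads l o.isSome := by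
  intro l
  induction l with
  | nil => intro o acc; simp [pvHeads]
  | cons c rest ih =>
    intro o acc
    cases o with
    | none =>
      by_cases hc : c = '-'
      · rw [List.foldl_cons, show pvStep (none, acc) c = (none, acc) from by simp [pvStep, hc]]
        rw [ih none acc]
        simp [pvHeads, hc]
      · rw [List.foldl_cons,
          show pvStep (none, acc) c = (some c, acc ++ [c]) from by simp [pvStep, hc]]
        rw [ih (some c) (acc ++ [c])]
        simp [pvHeads, hc]
    | some x =>
      by_cases hc : c = '-'
      · rw [List.foldl_cons, show pvStep (some x, acc) c = (none, acc) from by simp [pvStep, hc]]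
        rw [ih none acc]
        simp [pvHeads, hc]
      · rw [List.foldl_cons, show pvStep (some x, acc) c = (some x, acc) from by simp [pvStep, hc]]
        rw [ih (some x) acc]
        simp [pvHeads, hc]

-- ===== VERDICT (by name: the statement is the Claim_ definition above) =====
theorem solution_spec : Claim_equal_solution := by
  intro str _
  unfold Spec_solution solution solution_alt PySem.Chars.splitOn
  rw [pv_go_spec (str.toList.length + 1) str.toList [] [] (by omega)]
  rw [List.reverse_nil, List.nil_append, pv_splitAux_heads str.toList []]
  rw [pv_foldl_heads str.toList none []]
  simp
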